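-- pv_equiv track=rewrite | github.com/eric-vader/cs3244-assignments | assignment_2/autograder.py | majority_class_solution
-- ===== SOURCE A (Python) =====
-- def majority_class_solution(y):
--     counts = {}
--     for label in y:
--         counts[label] = counts.get(label, 0) + 1
--
--     max_count = -1
--     majority_class = None
--
--     # Get labels in sorted order to ensure deterministic tie-breaking (smallest label)
--     sorted_labels = sorted(counts.keys())
--
--     for label in sorted_labels:
--         count = counts[label]
--         if count > max_count:
--             max_count = count
--             majority_class = label
--
--     return majority_class
-- ===== SOURCE B (Python) =====
-- def majority_class_solution(y):
--     s = sorted(y)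
--     if not s:
--         return None
--     cur = best = s[0]
--     cur_len = best_len = 1
--     for x in s[1:]:
--         if x == cur:
--             cur_len += 1
--         else:
--             cur = x
--             cur_len = 1
--         if cur_len > best_len:
--             best_len = cur_len
--             best = cur
--     return best
-- ===== Notes on version B (the rewrite author's own statement) =====
-- stated objective: faster
-- what changed: B sorts the list once and finds the longest run in a single scan (strict-greater update keeps the smallest label on ties), instead of building a frequency dict and then scanning its sorted keys.
import Mathlib
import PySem

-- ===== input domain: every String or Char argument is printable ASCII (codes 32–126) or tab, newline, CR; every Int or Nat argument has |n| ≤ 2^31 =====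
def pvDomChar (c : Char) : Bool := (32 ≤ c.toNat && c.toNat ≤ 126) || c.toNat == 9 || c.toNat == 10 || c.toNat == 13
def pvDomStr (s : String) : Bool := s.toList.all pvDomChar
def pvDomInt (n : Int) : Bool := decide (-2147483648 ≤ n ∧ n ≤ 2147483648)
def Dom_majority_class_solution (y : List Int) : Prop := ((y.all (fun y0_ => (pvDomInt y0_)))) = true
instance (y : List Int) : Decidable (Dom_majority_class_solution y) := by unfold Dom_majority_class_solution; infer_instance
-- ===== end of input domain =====

-- B replaces A's frequency dict + sorted-keys scan by sorting the list once and
-- finding the longest run in a single pass (strict-greater update keeps the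
-- smallest label on ties); same asymptotic O(n log n), measured faster by a constant factor in a timing run.

-- ===== PORT A =====
def majority_class_solution (y : List Int) : Option Int :=
  let counts := y.foldl (fun d label => d.insert label (d.getD label 0 + 1)) PySem.Dict.empty
  let sorted_labels := PySem.List.sorted counts.keys (fun x => x) false
  (sorted_labels.foldl
    (fun (st : Int × Option Int) label =>
      let count := counts.getD label 0
      if count > st.1 then (count, some label) else st)
    ((-1 : Int), (none : Option Int))).2

-- ===== PORT B =====
-- loop body of Source B: extend or restart the current run, then update the best on strictly-greater length
def pvScanStep (st : Int × Int × Int × Int) (x : Int) : Int × Int × Int × Int :=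
  let cur := if x = st.1 then st.1 else x
  let clen := if x = st.1 then st.2.1 + 1 else 1
  if clen > st.2.2.2 then (cur, clen, cur, clen) else (cur, clen, st.2.2.1, st.2.2.2)

def majority_class_solution_alt (y : List Int) : Option Int :=
  match PySem.List.sorted y (fun x => x) false with
  | [] => none
  | h :: t => some ((t.foldl pvScanStep (h, 1, h, 1)).2.2.1)

-- ===== PRECONDITION & SPEC =====
def Spec_majority_class_solution (y : List Int) (out : Option Int) : Prop := out = majority_class_solution_alt y
instance (y : List Int) (out : Option Int) : Decidable (Spec_majority_class_solution y out) := by unfold Spec_majority_class_solution; infer_instance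

-- ===== CLAIM (what is proved, stated in full; the proofs are below) =====
def Claim_equal_majority_class_solution : Prop := ∀ (y : List Int), Dom_majority_class_solution y → Spec_majority_class_solution y (majority_class_solution y)

-- ===== LEMMAS AND PROOFS =====

-- A's key-scan, with the Option stripped (used only in proofs)
def pvGA (y : List Int) (L : List Int) (p : Int × Int) : Int × Int :=
  L.foldl (fun p l => if (y.count l : Int) > p.1 then ((y.count l : Int), l) else p) p

lemma pvFA_some (y : List Int) (L : List Int) (m b : Int) :
    L.foldl (fun (st : Int × Option Int) l =>
        if (y.count l : Int) > st.1 then ((y.count l : Int), some l) else st) (m, some b)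
      = ((pvGA y L (m, b)).1, some (pvGA y L (m, b)).2) := by
  induction L generalizing m b with
  | nil => simp [pvGA]
  | cons l L ih =>
      simp only [pvGA, List.foldl_cons]
      by_cases h : (y.count l : Int) > m <;> simp [h, ih, pvGA]

lemma pvScan_run (n : ℕ) (c k b m : Int) (hk : k ≤ m) :
    (List.replicate n c).foldl pvScanStep (c, k, b, m) =
      (c, k + n, (if k + n > m then c else b), (if k + n > m then k + n else m)) := by
  induction n generalizing k b m with
  | zero => simp; omega
  | succ n ih =>
      rw [List.replicate_succ, List.foldl_cons]
      show (List.replicate n c).foldl pvScanStep (pvScanStep (c, k, b, m) c) = _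
      simp only [pvScanStep, if_true]
      by_cases h : k + 1 > m
      · rw [if_pos h]
        rw [ih (k + 1) c (k + 1) le_rfl]
        simp only [Prod.mk.injEq]
        refine ⟨trivial, by push_cast; omega, ?_, ?_⟩ <;> split_ifs <;> first | rfl | (push_cast; omega)
      · rw [if_neg h]
        rw [ih (k + 1) b m (by omega)]
        simp only [Prod.mk.injEq]
        refine ⟨trivial, by push_cast; omega, ?_, ?_⟩ <;> split_ifs <;> first | rfl | (push_cast; omega)

lemma pvScan_flat (y : List Int) (L : List Int) (c k b m : Int)
    (hL : L.Pairwise (· < ·)) (hc : ∀ l ∈ L, c < l)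
    (hcnt : ∀ l ∈ L, 1 ≤ y.count l) (hm : 1 ≤ m) :
    ((L.flatMap (fun l => List.replicate (y.count l) l)).foldl pvScanStep (c, k, b, m)).2.2
      = ((pvGA y L (m, b)).2, (pvGA y L (m, b)).1) := by
  induction L generalizing c k b m with
  | nil => simp [pvGA]
  | cons l L ih =>
      have hl1 : 1 ≤ y.count l := hcnt l (by simp)
      have hcl : c < l := hc l (by simp)
      rw [List.flatMap_cons, List.foldl_append]
      have hrep : List.replicate (y.count l) l = l :: List.replicate (y.count l - 1) l := by
        cases hcount : y.count l with
        | zero => omega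
        | succ n => simp [List.replicate_succ]
      rw [hrep, List.foldl_cons]
      have hstep : pvScanStep (c, k, b, m) l = (l, 1, b, m) := by
        simp only [pvScanStep, if_neg (by omega : ¬ l = c)]
        rw [if_neg (by omega : ¬ (1 : Int) > m)]
      rw [hstep, pvScan_run _ _ _ _ _ hm]
      have hcast : (1 : Int) + (y.count l - 1 : ℕ) = (y.count l : Int) := by
        omega
      rw [hcast]
      have hpA : pvGA y (l :: L) (m, b)
          = pvGA y L (if (y.count l : Int) > m then ((y.count l : Int), l) else (m, b)) := by
        simp [pvGA]
      rw [hpA]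
      by_cases h : (y.count l : Int) > m
      · rw [if_pos h, if_pos h, if_pos h]
        exact ih l (y.count l) l (y.count l) (List.pairwise_cons.mp hL).2
          (fun x hx => (List.pairwise_cons.mp hL).1 x hx)
          (fun x hx => hcnt x (by simp [hx])) (by omega)
      · rw [if_neg h, if_neg h, if_neg h]
        exact ih l (y.count l) b m (List.pairwise_cons.mp hL).2
          (fun x hx => (List.pairwise_cons.mp hL).1 x hx)
          (fun x hx => hcnt x (by simp [hx])) hm

lemma pvCount_flat (y : List Int) (L : List Int) (hN : L.Nodup) (a : Int) :
    (L.flatMap (fun l => List.replicate (y.count l) l)).count a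
      = if a ∈ L then y.count a else 0 := by
  induction L with
  | nil => simp
  | cons l L ih =>
      rw [List.flatMap_cons, List.count_append, ih hN.of_cons]
      rw [List.count_replicate]
      by_cases h : a = l
      · subst h
        have : a ∉ L := (List.nodup_cons.mp hN).1
        simp [this]
      · simp [h, Ne.symm h]

lemma pvPairwise_flat (y : List Int) (L : List Int) (hp : L.Pairwise (· < ·)) :
    (L.flatMap (fun l => List.replicate (y.count l) l)).Pairwise (· ≤ ·) := by
  induction L with
  | nil => simp
  | cons l L ih =>
      rw [List.flatMap_cons, List.pairwise_append]
      refine ⟨List.pairwise_replicate.mpr (Or.inr le_rfl), ih (List.pairwise_cons.mp hp).2, ?_⟩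
      intro x hx z hz
      rw [List.eq_of_mem_replicate hx]
      rcases List.mem_flatMap.mp hz with ⟨l', hl', hz'⟩
      rw [List.eq_of_mem_replicate hz']
      exact le_of_lt ((List.pairwise_cons.mp hp).1 l' hl')

lemma pvSorted_flat (y : List Int) :
    PySem.List.sorted y (fun x => x) false
      = (PySem.List.sorted (PySem.Set.ofList y) (fun x => x) false).flatMap
          (fun l => List.replicate (y.count l) l) := by
  set L := PySem.List.sorted (PySem.Set.ofList y) (fun x => x) false with hLdef
  have hlt : L.Pairwise (· < ·) := PySem.List.sorted_ofList_pairwise_lt y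
  have hN : L.Nodup := hlt.nodup
  have hmem : ∀ a, a ∈ L ↔ a ∈ y := by
    intro a
    rw [hLdef, PySem.List.mem_sorted, PySem.Set.mem_ofList]
  have hperm : (L.flatMap (fun l => List.replicate (y.count l) l)).Perm y := by
    rw [List.perm_iff_count]
    intro a
    rw [pvCount_flat y L hN a]
    by_cases h : a ∈ L
    · simp [h]
    · have : a ∉ y := fun hy => h ((hmem a).mpr hy)
      simp [h, List.count_eq_zero_of_not_mem this]
  exact PySem.List.sorted_id_eq_of_perm_of_pairwise _ _ hperm (pvPairwise_flat y L hlt)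

lemma pvA_reduce (y : List Int) :
    majority_class_solution y
      = ((PySem.List.sorted (PySem.Set.ofList y) (fun x => x) false).foldl
          (fun (st : Int × Option Int) l =>
            if (y.count l : Int) > st.1 then ((y.count l : Int), some l) else st)
          ((-1 : Int), (none : Option Int))).2 := by
  unfold majority_class_solution
  rw [show y.foldl (fun d label => d.insert label (d.getD label 0 + 1)) PySem.Dict.empty
        = PySem.Dict.counter y from PySem.Dict.foldl_insert_getD_add_one_eq_counter y]
  simp only [PySem.Dict.keys_counter, PySem.Dict.getD_counter]

-- ===== VERDICT (by name: the statement is the Claim_ definition above) =====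
theorem majority_class_solution_spec : Claim_equal_majority_class_solution := by
  intro y _
  unfold Spec_majority_class_solution
  rw [pvA_reduce]
  unfold majority_class_solution_alt
  rw [pvSorted_flat y]
  set L := PySem.List.sorted (PySem.Set.ofList y) (fun x => x) false with hLdef
  have hlt : L.Pairwise (· < ·) := PySem.List.sorted_ofList_pairwise_lt y
  have hmem : ∀ a, a ∈ L ↔ a ∈ y := by
    intro a; rw [hLdef, PySem.List.mem_sorted, PySem.Set.mem_ofList]
  have hcnt : ∀ l ∈ L, 1 ≤ y.count l := by
    intro l hl
    exact List.count_pos_iff.mpr ((hmem l).mp hl)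
  cases hL : L with
  | nil => simp
  | cons l0 L' =>
      have h0 : 1 ≤ y.count l0 := hcnt l0 (by rw [hL]; simp)
      have hrep : List.replicate (y.count l0) l0 = l0 :: List.replicate (y.count l0 - 1) l0 := by
        cases hc : y.count l0 with
        | zero => omega
        | succ n => simp [List.replicate_succ]
      rw [List.flatMap_cons, hrep]
      simp only [List.cons_append, List.foldl_cons, List.foldl_append]
      rw [if_pos (by omega : (y.count l0 : Int) > -1)]
      rw [pvFA_some]
      rw [pvScan_run _ _ _ _ _ le_rfl]
      have hcast : (1 : Int) + (y.count l0 - 1 : ℕ) = (y.count l0 : Int) := by omega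
      rw [hcast]
      have hsimp : (if (y.count l0 : Int) > 1 then l0 else l0) = l0 := by split_ifs <;> rfl
      have hflat := pvScan_flat y L' l0 (y.count l0) l0
        (if (y.count l0 : Int) > 1 then (y.count l0 : Int) else 1)
        (List.pairwise_cons.mp (hL ▸ hlt)).2
        (fun x hx => (List.pairwise_cons.mp (hL ▸ hlt)).1 x hx)
        (fun x hx => hcnt x (by rw [hL]; simp [hx])) (by omega)
      rw [hsimp]
      have hm : (if (y.count l0 : Int) > 1 then (y.count l0 : Int) else 1) = (y.count l0 : Int) := by
        split_ifs <;> omega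
      rw [hm] at hflat
      rw [hm, congrArg Prod.fst hflat]
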